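-- pv_equiv track=rewrite | github.com/Pawan-Bhatt/Leetcode_solution | Triangle and Square - GFG/triangle-and-square.py | countShare
-- ===== SOURCE A (Python) =====
-- def countShare(B):
--     count = 0
--     l = B
--     max_sq = int((l - 2)/2)
--     while max_sq > 0:
--         count += max_sq
--         max_sq = max_sq - 1
--     return count
-- ===== SOURCE B (Python) =====
-- def countShare(B):
--     n = (B - 2) // 2
--     return n * (n + 1) // 2 if n > 0 else 0
-- ===== Notes on version B (the rewrite author's own statement) =====
-- stated objective: faster
-- what changed: Replaced the descending while-loop summation 1..max_sq by the closed-form triangular number n*(n+1)//2 with n=(B-2)//2.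
import Mathlib
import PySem

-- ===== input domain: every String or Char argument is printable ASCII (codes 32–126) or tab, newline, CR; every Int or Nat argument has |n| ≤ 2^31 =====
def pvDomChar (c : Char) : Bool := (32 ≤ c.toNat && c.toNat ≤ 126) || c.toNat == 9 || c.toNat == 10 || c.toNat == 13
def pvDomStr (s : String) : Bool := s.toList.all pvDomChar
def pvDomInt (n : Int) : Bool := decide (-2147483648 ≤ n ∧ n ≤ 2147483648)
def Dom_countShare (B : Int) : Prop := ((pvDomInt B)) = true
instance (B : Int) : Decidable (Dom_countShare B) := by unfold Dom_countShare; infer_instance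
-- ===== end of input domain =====

-- B replaces A's O(B) counting loop by the closed-form triangular number (O(1)).
-- ===== PORT A =====
-- while max_sq > 0: count += max_sq; max_sq -= 1
def countShareLoop (max_sq count : Int) : Int :=
  if max_sq > 0 then countShareLoop (max_sq - 1) (count + max_sq) else count
termination_by max_sq.toNat
decreasing_by omega

def countShare (B : Int) : Int :=
  -- int((l - 2)/2): float true division then int() truncates toward zero = Int.tdiv (exact: |B| ≤ 2^31 < 2^53)
  countShareLoop (Int.tdiv (B - 2) 2) 0

-- ===== PORT B =====
def countShare_alt (B : Int) : Int :=
  let n := PySem.Int.floordiv (B - 2) 2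
  if n > 0 then PySem.Int.floordiv (n * (n + 1)) 2 else 0

-- ===== PRECONDITION & SPEC =====
def Spec_countShare (B : Int) (out : Int) : Prop := out = countShare_alt B
instance (B : Int) (out : Int) : Decidable (Spec_countShare B out) := by unfold Spec_countShare; infer_instance

-- ===== CLAIM (what is proved, stated in full; the proofs are below) =====
def Claim_equal_countShare : Prop := ∀ (B : Int), Dom_countShare B → Spec_countShare B (countShare B)

-- ===== LEMMAS AND PROOFS =====

-- ===== VERDICT (by name: the statement is the Claim_ definition above) =====
-- the loop sums max_sq + (max_sq-1) + … + 1
theorem countShareLoop_eq (m c : Int) (hm : 0 ≤ m) : countShareLoop m c = c + m * (m + 1) / 2 := by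
  induction m, hm using Int.le_induction generalizing c with
  | base => simp [countShareLoop]
  | succ k hk ih =>
      rw [countShareLoop]
      rw [if_pos (by omega)]
      have hk1 : k + 1 - 1 = k := by omega
      rw [hk1, ih]
      have e : (k + 1) * (k + 1 + 1) = k * (k + 1) + (k + 1) * 2 := by ring
      rw [e, Int.add_mul_ediv_right _ _ (by norm_num : (2:Int) ≠ 0)]
      ring

theorem countShareLoop_nonpos (m c : Int) (hm : m ≤ 0) : countShareLoop m c = c := by
  rw [countShareLoop, if_neg (by omega)]

theorem countShare_spec : Claim_equal_countShare := by
  intro B _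
  unfold Spec_countShare countShare countShare_alt PySem.Int.floordiv
  by_cases h : 3 ≤ B
  · have hpos : 0 ≤ B - 2 := by omega
    rw [Int.tdiv_eq_ediv_of_nonneg hpos, ← Int.fdiv_eq_ediv_of_nonneg _ (by omega : (0:Int) ≤ 2)]
    set n := Int.fdiv (B - 2) 2 with hn
    by_cases h0 : n ≤ 0
    · rw [countShareLoop_nonpos _ _ h0]
      simp [if_neg (not_lt.mpr h0)]
    · rw [not_le] at h0
      rw [countShareLoop_eq _ _ (by omega), if_pos h0,
        Int.fdiv_eq_ediv_of_nonneg _ (by omega : (0:Int) ≤ 2)]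
      simp
  · have ht : Int.tdiv (B - 2) 2 ≤ 0 := by
      have := Int.tdiv_nonneg (a := -(B - 2)) (b := 2) (by omega) (by omega)
      rw [Int.neg_tdiv] at this; omega
    have hf : Int.fdiv (B - 2) 2 ≤ 0 := by
      by_cases h0 : B - 2 = 0
      · rw [h0, Int.zero_fdiv]
      · exact le_of_lt (Int.fdiv_neg_of_neg_of_pos (by omega) (by omega))
    rw [countShareLoop_nonpos _ _ ht]
    simp [if_neg (not_lt.mpr hf)]
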